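-- pv_equiv track=rewrite | github.com/martinwk/chord_importer_tool | songselect/parse_onsong_export.py | is_section_identifier
-- ===== SOURCE A (Python) =====
-- def is_section_identifier(line: str) -> bool:
--     """Check if a line is a section identifier (with or without !)."""
--     line = line.strip().lower()
--
--     # Known section identifiers
--     identifiers = [
--         'chorus', 'verse', 'bridge', 'intro', 'interlude', 'pre-chorus',
--         'post-chorus', 'tag', 'instrumental', 'outro', 'refrain'
--     ]
--
--     # Check if line starts with ! or is exactly one of our identifiers
--     if line.startswith('!'):
--         return True
--
--     # Check if it's a standalone identifier (possibly with numbers)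
--     for identifier in identifiers:
--         if line == identifier or line.startswith(identifier + ' '):
--             return True
--
--     return False
-- ===== SOURCE B (Python) =====
-- # Binary search over a sorted tuple of identifiers, on the first token found via find/slice.
-- _SORTED_IDS = ('bridge', 'chorus', 'instrumental', 'interlude', 'intro',
--                'outro', 'post-chorus', 'pre-chorus', 'refrain', 'tag', 'verse')
--
--
-- def is_section_identifier(line: str) -> bool:
--     """Check if a line is a section identifier (with or without !)."""
--     line = line.strip().lower()
--     if line.startswith('!'):
--         return True
--     i = line.find(' ')
--     token = line if i < 0 else line[:i]
--     lo, hi = 0, len(_SORTED_IDS)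
--     while lo < hi:
--         mid = (lo + hi) // 2
--         ident = _SORTED_IDS[mid]
--         if ident < token:
--             lo = mid + 1
--         elif token < ident:
--             hi = mid
--         else:
--             return True
--     return False
-- ===== Notes on version B (the rewrite author's own statement) =====
-- stated objective: alternative
-- what changed: Instead of scanning all identifiers with equality and space-extended startswith tests, B extracts the first token with find/slice and binary-searches a sorted tuple of the identifiers.
import Mathlib
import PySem

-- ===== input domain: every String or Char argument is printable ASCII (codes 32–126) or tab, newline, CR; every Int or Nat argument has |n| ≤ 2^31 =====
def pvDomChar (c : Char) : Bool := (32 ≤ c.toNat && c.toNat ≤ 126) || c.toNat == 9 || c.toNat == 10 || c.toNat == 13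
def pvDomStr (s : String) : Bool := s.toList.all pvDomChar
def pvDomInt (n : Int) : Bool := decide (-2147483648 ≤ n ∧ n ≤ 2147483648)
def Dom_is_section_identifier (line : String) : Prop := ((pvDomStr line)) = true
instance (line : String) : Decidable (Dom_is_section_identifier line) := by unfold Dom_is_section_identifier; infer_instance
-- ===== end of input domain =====

-- B replaces A's per-identifier scan (equality/prefix tests over the list) by a different
-- algorithm: it isolates the first token via find/slice and binary-searches a sorted tuple of
-- the identifiers (alternative; correct because the tuple is strictly sorted).

-- ===== PORT A =====
def is_section_identifier (line : String) : Bool :=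
  let line := PySem.Str.lower (PySem.Str.strip line)
  let identifiers : List String :=
    ["chorus", "verse", "bridge", "intro", "interlude", "pre-chorus",
     "post-chorus", "tag", "instrumental", "outro", "refrain"]
  if PySem.Str.startswith line "!" then true
  else identifiers.any (fun identifier =>
    line == identifier || PySem.Str.startswith line (identifier ++ " "))

-- ===== PORT B =====
def pvSortedIds : List String :=
  ["bridge", "chorus", "instrumental", "interlude", "intro",
   "outro", "post-chorus", "pre-chorus", "refrain", "tag", "verse"]

-- the while loop of Source B; _SORTED_IDS[mid] is in range (lo < hi ≤ len), ported as getD;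
-- Python's < on str is code-point lexicographic = PySem.Chars.strLt on the code points (exact)
def pvBsearch (token : String) (lo hi : Nat) : Bool :=
  if lo < hi then
    let mid := (lo + hi) / 2
    let ident := pvSortedIds.getD mid ""
    if PySem.Chars.strLt ident.toList token.toList then pvBsearch token (mid + 1) hi
    else if PySem.Chars.strLt token.toList ident.toList then pvBsearch token lo mid
    else true
  else false
termination_by hi - lo
decreasing_by all_goals omega

def is_section_identifier_alt (line : String) : Bool :=
  let line := PySem.Str.lower (PySem.Str.strip line)
  if PySem.Str.startswith line "!" then true
  else
    let i := PySem.Str.find line " "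
    let token := if i < 0 then line else PySem.Str.slice line none (some i)
    pvBsearch token 0 pvSortedIds.length

-- ===== PRECONDITION & SPEC =====
def Spec_is_section_identifier (line : String) (out : Bool) : Prop := out = is_section_identifier_alt line
instance (line : String) (out : Bool) : Decidable (Spec_is_section_identifier line out) := by unfold Spec_is_section_identifier; infer_instance

-- ===== CLAIM (what is proved, stated in full; the proofs are below) =====
def Claim_equal_is_section_identifier : Prop := ∀ (line : String), Dom_is_section_identifier line → Spec_is_section_identifier line (is_section_identifier line)

-- ===== LEMMAS AND PROOFS =====

-- the sorted tuple is strictly increasing, index-wise, in Python's string order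
theorem pv_sorted : ∀ j, j < 11 → ∀ k, k < j →
    (pvSortedIds.getD k "").toList < (pvSortedIds.getD j "").toList := by
  have h : ∀ j, j < 11 → ∀ k, k < j →
      PySem.Chars.strLt (pvSortedIds.getD k "").toList (pvSortedIds.getD j "").toList = true := by
    decide
  intro j hj k hk
  exact of_decide_eq_true (h j hj k hk)

-- binary-search characterisation: true iff the token sits at some index in [lo, hi)
theorem pvBsearch_spec (token : String) (lo hi : Nat) (hhi : hi ≤ 11) :
    pvBsearch token lo hi = true ↔ ∃ k, lo ≤ k ∧ k < hi ∧ pvSortedIds.getD k "" = token := by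
  induction lo, hi using pvBsearch.induct token with
  | case1 lo hi h mid ident h1 ih =>
    rw [pvBsearch, if_pos h, if_pos h1, ih hhi]
    have h1' : ident.toList < token.toList := of_decide_eq_true h1
    constructor
    · rintro ⟨k, hk1, hk2, hk3⟩; exact ⟨k, by omega, hk2, hk3⟩
    · rintro ⟨k, hk1, hk2, hk3⟩
      refine ⟨k, ?_, hk2, hk3⟩
      by_contra hc
      have hcase : k < mid ∨ k = mid := by omega
      rcases hcase with hlt | rfl
      · have hx := pv_sorted mid (by omega) k hlt
        rw [hk3] at hx
        exact absurd (lt_trans hx h1') (lt_irrefl token.toList)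
      · have h1'' : (pvSortedIds.getD mid "").toList < token.toList := h1'
        rw [hk3] at h1''
        exact lt_irrefl token.toList h1''
  | case2 lo hi h mid ident h1 h2 ih =>
    rw [pvBsearch, if_pos h, if_neg h1, if_pos h2, ih (by omega)]
    have h2' : token.toList < ident.toList := of_decide_eq_true h2
    constructor
    · rintro ⟨k, hk1, hk2, hk3⟩; exact ⟨k, hk1, by omega, hk3⟩
    · rintro ⟨k, hk1, hk2, hk3⟩
      refine ⟨k, hk1, ?_, hk3⟩
      by_contra hc
      have hcase : mid < k ∨ k = mid := by omega
      rcases hcase with hlt | rfl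
      · have hx := pv_sorted k (by omega) mid hlt
        rw [hk3] at hx
        exact lt_irrefl token.toList (lt_trans h2' hx)
      · have h2'' : token.toList < (pvSortedIds.getD mid "").toList := h2'
        rw [hk3] at h2''
        exact lt_irrefl token.toList h2''
  | case3 lo hi h mid ident h1 h2 =>
    rw [pvBsearch, if_pos h, if_neg h1, if_neg h2]
    have h1' : ¬ ident.toList < token.toList := of_decide_eq_false (Bool.not_eq_true _ ▸ h1)
    have h2' : ¬ token.toList < ident.toList := of_decide_eq_false (Bool.not_eq_true _ ▸ h2)
    have heq : pvSortedIds.getD mid "" = token := by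
      have : ident.toList = token.toList := le_antisymm (le_of_not_gt h2') (le_of_not_gt h1')
      exact String.ext this
    constructor
    · intro _
      refine ⟨mid, ?_, ?_, heq⟩
      · show lo ≤ (lo + hi) / 2; omega
      · show (lo + hi) / 2 < hi; omega
    · intro _; rfl
  | case4 lo hi h =>
    rw [pvBsearch, if_neg h]
    constructor
    · intro hfalse; exact absurd hfalse (by simp)
    · rintro ⟨k, hk1, hk2, -⟩; omega

-- membership at an index of the concrete list, spelled out
theorem pv_mem_iff (token : String) :
    (∃ k, 0 ≤ k ∧ k < 11 ∧ pvSortedIds.getD k "" = token) ↔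
      (token = "bridge" ∨ token = "chorus" ∨ token = "instrumental" ∨ token = "interlude" ∨
       token = "intro" ∨ token = "outro" ∨ token = "post-chorus" ∨ token = "pre-chorus" ∨
       token = "refrain" ∨ token = "tag" ∨ token = "verse") := by
  constructor
  · rintro ⟨k, -, hk, he⟩
    interval_cases k <;> simp_all [pvSortedIds]
  · rintro (rfl | rfl | rfl | rfl | rfl | rfl | rfl | rfl | rfl | rfl | rfl)
    exacts [⟨0, by omega, by omega, rfl⟩, ⟨1, by omega, by omega, rfl⟩,
      ⟨2, by omega, by omega, rfl⟩, ⟨3, by omega, by omega, rfl⟩,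
      ⟨4, by omega, by omega, rfl⟩, ⟨5, by omega, by omega, rfl⟩,
      ⟨6, by omega, by omega, rfl⟩, ⟨7, by omega, by omega, rfl⟩,
      ⟨8, by omega, by omega, rfl⟩, ⟨9, by omega, by omega, rfl⟩,
      ⟨10, by omega, by omega, rfl⟩]

-- the two 11-way disjunctions list the same identifiers in different orders
theorem pv_perm (token : String) :
    (token = "chorus" ∨ token = "verse" ∨ token = "bridge" ∨ token = "intro" ∨
     token = "interlude" ∨ token = "pre-chorus" ∨ token = "post-chorus" ∨ token = "tag" ∨
     token = "instrumental" ∨ token = "outro" ∨ token = "refrain") ↔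
      (token = "bridge" ∨ token = "chorus" ∨ token = "instrumental" ∨ token = "interlude" ∨
       token = "intro" ∨ token = "outro" ∨ token = "post-chorus" ∨ token = "pre-chorus" ∨
       token = "refrain" ∨ token = "tag" ∨ token = "verse") := by
  constructor <;> rintro (rfl | rfl | rfl | rfl | rfl | rfl | rfl | rfl | rfl | rfl | rfl) <;> simp

-- A's per-identifier test, characterised by the longest space-free prefix
theorem pv_key (cs t : List Char) (ht : ' ' ∉ t) :
    (cs = t ∨ t ++ [' '] <+: cs) ↔ cs.takeWhile (· ≠ ' ') = t := by
  have hself : List.takeWhile (fun x => decide (x ≠ ' ')) t = t :=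
    List.takeWhile_eq_self_iff.mpr (fun x hx => by simp; rintro rfl; exact ht hx)
  constructor
  · rintro (rfl | ⟨r, rfl⟩)
    · exact hself
    · rw [List.append_assoc, List.takeWhile_append,
        if_pos (by rw [hself]), List.singleton_append]
      simp [List.takeWhile]
  · intro h
    have hsplit := List.takeWhile_append_dropWhile (p := fun x => decide (x ≠ ' ')) (l := cs)
    rw [h] at hsplit
    cases hd : List.dropWhile (fun x => decide (x ≠ ' ')) cs with
    | nil => left; rw [← hsplit, hd, List.append_nil]
    | cons x r =>
      have hx : ¬ (decide (x ≠ ' ') = true) := by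
        have := List.head?_dropWhile_not (p := fun x => decide (x ≠ ' ')) (l := cs)
        rw [hd] at this; simpa using this
      have hx' : x = ' ' := by simpa using hx
      right
      exact ⟨r, by rw [← hsplit, hd, hx']; simp⟩

theorem pv_elem (s id : String) (h : ' ' ∉ id.toList) :
    (s == id || PySem.Str.startswith s (id ++ " ")) = (String.ofList (s.toList.takeWhile (· ≠ ' ')) == id) := by
  rw [Bool.eq_iff_iff]
  simp only [Bool.or_eq_true, beq_iff_eq, PySem.Str.startswith_eq, PySem.Chars.startswith_iff]
  have h1 : (s = id ∨ (id ++ " ").toList <+: s.toList) ↔ s.toList.takeWhile (· ≠ ' ') = id.toList := by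
    rw [← pv_key _ _ h]
    constructor
    · rintro (rfl | hp)
      · left; rfl
      · right; simpa [String.toList_append] using hp
    · rintro (he | hp)
      · left; exact String.ext he
      · right; simpa [String.toList_append] using hp
  rw [h1]
  constructor
  · intro he; rw [he]; simp [String.ofList]
  · intro he; have := congrArg String.toList he; simpa using this

-- a singleton space is a prefix of l.drop i exactly when l[i] is a space
theorem pv_prefix_drop (l : List Char) (i : Nat) : [' '] <+: l.drop i ↔ l[i]? = some ' ' := by
  constructor
  · rintro ⟨r, hr⟩
    have hh : (l.drop i).head? = some ' ' := by rw [← hr]; rfl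
    rwa [List.head?_drop] at hh
  · intro h
    have hd : (l.drop i).head? = some ' ' := by rwa [List.head?_drop]
    cases hl : l.drop i with
    | nil => rw [hl] at hd; simp at hd
    | cons x r =>
      rw [hl] at hd
      simp only [List.head?_cons, Option.some_inj] at hd
      subst hd
      exact ⟨r, by simp⟩

-- takeWhile up to the first space is take of the index of that space
theorem pv_takeWhile_take (l : List Char) (n : Nat)
    (hmin : ∀ i, i < n → l[i]? ≠ some ' ') (hat : l[n]? = some ' ') :
    l.takeWhile (· ≠ ' ') = l.take n := by
  induction l generalizing n with
  | nil => simp at hat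
  | cons c t ih =>
    cases n with
    | zero =>
      simp only [List.getElem?_cons_zero, Option.some_inj] at hat
      subst hat
      simp [List.takeWhile]
    | succ m =>
      have hc : c ≠ ' ' := by
        have := hmin 0 (Nat.succ_pos m)
        simpa using this
      simp only [List.takeWhile_cons, List.take_succ_cons]
      rw [if_pos (by simpa using hc), ih m (fun i hi => by simpa using hmin (i + 1) (by omega)) (by simpa using hat)]

-- B's token (find + slice) is the longest space-free prefix of the line
theorem pv_token (s : String) :
    (if PySem.Str.find s " " < 0 then s
     else PySem.Str.slice s none (some (PySem.Str.find s " "))) =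
      String.ofList (s.toList.takeWhile (· ≠ ' ')) := by
  by_cases hneg : PySem.Str.find s " " = -1
  · rw [if_pos (by rw [hneg]; norm_num)]
    have hni : ¬ (" ".toList <:+: s.toList) := (PySem.Str.find_eq_neg_one_iff s " ").mp hneg
    have hmem : ' ' ∉ s.toList := by
      intro hm
      obtain ⟨u, v, huv⟩ := List.append_of_mem hm
      exact hni ⟨u, v, by rw [huv]; simp⟩
    have hall : s.toList.takeWhile (· ≠ ' ') = s.toList :=
      List.takeWhile_eq_self_iff.mpr (fun x hx => by simp; rintro rfl; exact hmem hx)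
    rw [hall]
    exact String.ofList_toList.symm
  · have hnn : (0 : Int) ≤ PySem.Str.find s " " := by
      have := PySem.Chars.neg_one_le_find s.toList " ".toList
      simp only [PySem.Str.find] at hneg ⊢
      omega
    rw [if_neg (by omega)]
    obtain ⟨n, hn⟩ : ∃ n : Nat, PySem.Str.find s " " = (n : Int) :=
      ⟨(PySem.Str.find s " ").toNat, (Int.toNat_of_nonneg hnn).symm⟩
    have hspec := PySem.Chars.find_spec (s := s.toList) (sub := " ".toList)
      (by simpa [PySem.Str.find] using hnn)
    rw [show PySem.Chars.find s.toList " ".toList = (n : Int) from by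
      simpa [PySem.Str.find] using hn] at hspec
    simp only [Int.toNat_natCast] at hspec
    obtain ⟨hpre, hmin⟩ := hspec
    have hat : s.toList[n]? = some ' ' := (pv_prefix_drop s.toList n).mp (by simpa using hpre)
    have hmin' : ∀ i, i < n → s.toList[i]? ≠ some ' ' := fun i hi hsp =>
      hmin i hi (by simpa using (pv_prefix_drop s.toList i).mpr hsp)
    rw [hn, PySem.Str.slice, PySem.Chars.slice, PySem.List.slice_to _ (by positivity),
      Int.toNat_natCast, pv_takeWhile_take s.toList n hmin' hat]

-- ===== VERDICT (by name: the statement is the Claim_ definition above) =====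
theorem is_section_identifier_spec : Claim_equal_is_section_identifier := by
  unfold Claim_equal_is_section_identifier
  intro line _
  unfold Spec_is_section_identifier is_section_identifier is_section_identifier_alt
  simp only []
  by_cases hb : PySem.Str.startswith (PySem.Str.lower (PySem.Str.strip line)) "!" = true
  · rw [if_pos hb, if_pos hb]
  · rw [if_neg hb, if_neg hb]
    set s := PySem.Str.lower (PySem.Str.strip line) with hs
    rw [pv_token s]
    rw [show pvSortedIds.length = 11 from rfl, Bool.eq_iff_iff,
      pvBsearch_spec _ 0 11 (le_refl 11), pv_mem_iff, ← pv_perm]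
    simp only [List.any_cons, List.any_nil, Bool.or_false,
      pv_elem _ "chorus" (by decide), pv_elem _ "verse" (by decide),
      pv_elem _ "bridge" (by decide), pv_elem _ "intro" (by decide),
      pv_elem _ "interlude" (by decide), pv_elem _ "pre-chorus" (by decide),
      pv_elem _ "post-chorus" (by decide), pv_elem _ "tag" (by decide),
      pv_elem _ "instrumental" (by decide), pv_elem _ "outro" (by decide),
      pv_elem _ "refrain" (by decide)]
    simp only [Bool.or_eq_true, beq_iff_eq]
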